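-- pv_equiv track=rewrite | github.com/Juh17/PI_I | Buscador/buscador.py | palavra_chave
-- ===== SOURCE A (Python) =====
-- def palavra_chave(c, t):
--     array = []
--
--     for i in range(len(t)):
--         if t[i:i+len(c)] == c:
--             ini = max(0, i - 10)
--             fim = min(len(t), i+len(c) + 10)
--             cont = t[ini:fim]
--             array.append(cont)
--
--     return array
-- ===== SOURCE B (Python) =====
-- def palavra_chave(c, t):
--     array = []
--     i = t.find(c)
--     while i != -1:
--         ini = max(0, i - 10)
--         fim = min(len(t), i + len(c) + 10)
--         array.append(t[ini:fim])
--         i = t.find(c, i + 1)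
--     return array
-- ===== Notes on version B (the rewrite author's own statement) =====
-- stated objective: faster
-- what changed: Replaces the per-index Python loop that slices and compares at every position with a while loop over str.find, which jumps directly from one occurrence to the next.
-- outside the precondition, e.g. on palavra_chave('', 'ab'): A returns ['ab', 'ab'], B returns ['ab', 'ab', 'ab']
import Mathlib
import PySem

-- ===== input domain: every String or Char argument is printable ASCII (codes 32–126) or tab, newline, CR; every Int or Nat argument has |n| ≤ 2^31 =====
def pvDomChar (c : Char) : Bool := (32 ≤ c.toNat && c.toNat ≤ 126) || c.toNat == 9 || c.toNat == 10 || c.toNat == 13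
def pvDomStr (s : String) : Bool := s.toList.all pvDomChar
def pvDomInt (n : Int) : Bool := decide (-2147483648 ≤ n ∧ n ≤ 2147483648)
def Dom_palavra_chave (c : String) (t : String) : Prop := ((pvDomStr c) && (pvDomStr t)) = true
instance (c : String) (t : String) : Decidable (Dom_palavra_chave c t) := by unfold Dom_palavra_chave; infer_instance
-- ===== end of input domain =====

-- B replaces A's per-index scan (slice-and-compare at every position) with a while loop over
-- str.find that jumps from one occurrence to the next; objective: faster.


-- ===== PORT A =====
-- snippet t[max(0, i-10) : min(len(t), i+len(c)+10)] (ini/fim/cont of A, shared verbatim by B)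
def pvSnip (c : String) (t : String) (i : Int) : String :=
  PySem.Str.slice t (some (max 0 (i - 10))) (some (min (PySem.Str.len t) (i + PySem.Str.len c + 10)))

def palavra_chave (c : String) (t : String) : List String :=
  (PySem.List.pyRange 0 (PySem.Str.len t) 1).foldl
    (fun array i =>
      if PySem.Str.slice t (some i) (some (i + PySem.Str.len c)) = c then
        array ++ [pvSnip c t i]
      else array) []

-- ===== PORT B =====
-- while i != -1: append snippet; i = t.find(c, i+1).  The fuel argument is a totality guard
-- only (the found index strictly increases and is bounded by len(t), so it is never exhausted).
def pvAltLoop (c : String) (t : String) (fuel : Nat) (i : Int) (array : List String) : List String :=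
  match fuel with
  | 0 => array
  | fuel + 1 =>
    if i = -1 then array
    else pvAltLoop c t fuel (PySem.Str.findFrom t c (i + 1)) (array ++ [pvSnip c t i])

def palavra_chave_alt (c : String) (t : String) : List String :=
  pvAltLoop c t (t.toList.length + 2) (PySem.Str.find t c) []

-- ===== PRECONDITION & SPEC =====
-- Pre_ excludes the empty keyword, an unspecified corner on which both answers are defensible:
-- A returns a snippet for every index 0..len(t)-1, while B's find loop also yields the match
-- the empty string has at position len(t).
def Pre_palavra_chave (c : String) (t : String) : Prop := c ≠ ""
instance (c : String) (t : String) : Decidable (Pre_palavra_chave c t) := by unfold Pre_palavra_chave; infer_instance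
def pvWitness_palavra_chave : String × String := ("an", "banana")

def Spec_palavra_chave (c : String) (t : String) (out : List String) : Prop := out = palavra_chave_alt c t
instance (c : String) (t : String) (out : List String) : Decidable (Spec_palavra_chave c t out) := by unfold Spec_palavra_chave; infer_instance

-- ===== CLAIM (what is proved, stated in full; the proofs are below) =====
def Claim_equal_palavra_chave : Prop := ∀ (c : String) (t : String), Dom_palavra_chave c t → Pre_palavra_chave c t → Spec_palavra_chave c t (palavra_chave c t)

-- ===== LEMMAS AND PROOFS =====

-- Prop-valued 'if' form of PySem.List.foldl_append_if
theorem pvFoldl_append_if {α β : Type} (p : α → Prop) [DecidablePred p] (f : α → β)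
    (l : List α) (acc : List β) :
    l.foldl (fun acc x => if p x then acc ++ [f x] else acc) acc
      = acc ++ (l.filter (fun x => decide (p x))).map f := by
  have h := PySem.List.foldl_append_if (fun x => decide (p x)) f l acc
  simpa using h

-- A's slice-equality test at a natural position m is 'c.toList is a prefix of t.toList.drop m'
theorem pvMatch_iff (c t : String) (m : Nat) :
    PySem.Str.slice t (some (m : Int)) (some ((m : Int) + PySem.Str.len c)) = c
      ↔ c.toList <+: t.toList.drop m := by
  rw [← String.toList_inj, PySem.Str.toList_slice, PySem.Chars.slice_eq_listSlice,
    PySem.Str.len_eq, PySem.List.slice_natCast_add, List.prefix_iff_eq_take, eq_comm]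

theorem pvLoop_eq (c t : String) (hc : c.toList ≠ []) :
    ∀ (fuel k : Nat) (acc : List String), k ≤ t.toList.length →
      t.toList.length + 1 ≤ fuel + k →
      pvAltLoop c t fuel (PySem.Str.findFrom t c (k : Int)) acc
        = acc ++ ((PySem.List.pyRange (k : Int) (PySem.Str.len t) 1).filter
            (fun i => decide (PySem.Str.slice t (some i) (some (i + PySem.Str.len c)) = c))).map
              (pvSnip c t) := by
  intro fuel
  induction fuel with
  | zero => intro k acc hk hfuel; omega
  | succ fuel ih =>
    intro k acc hk hfuel
    have hff : PySem.Str.findFrom t c (k : Int) = PySem.Chars.findFrom t.toList c.toList (k : Int) := by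
      simp
    by_cases hr : PySem.Chars.findFrom t.toList c.toList (k : Int) = -1
    · -- no further occurrence: loop stops, and the filter over [k, len t) is empty
      have hno : ¬ c.toList <:+: t.toList.drop k :=
        (PySem.Chars.findFrom_natCast_eq_neg_one_iff t.toList c.toList k hk).mp hr
      have hfil : ((PySem.List.pyRange (k : Int) (PySem.Str.len t) 1).filter
          (fun i => decide (PySem.Str.slice t (some i) (some (i + PySem.Str.len c)) = c))) = [] := by
        rw [List.filter_eq_nil_iff]
        intro i hi
        rw [PySem.Str.len_eq] at hi
        have hmem := (PySem.List.mem_pyRange_one.mp hi)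
        have h0 : 0 ≤ i := le_trans (by exact_mod_cast Nat.zero_le k) hmem.1
        have hieq : i = ((i.toNat : Nat) : Int) := (Int.toNat_of_nonneg h0).symm
        simp only [decide_eq_true_eq]
        intro heq
        rw [hieq] at heq
        have hpre : c.toList <+: t.toList.drop i.toNat := (pvMatch_iff c t i.toNat).mp heq
        have hki : k ≤ i.toNat := by omega
        have : t.toList.drop i.toNat = (t.toList.drop k).drop (i.toNat - k) := by
          rw [List.drop_drop]; congr 1; omega
        rw [this] at hpre
        exact hno (hpre.isInfix.trans (List.drop_suffix _ _).isInfix)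
      rw [hff, pvAltLoop, if_pos hr, hfil]
      simp
    · -- first occurrence at m = (findFrom …).toNat: emit its snippet and continue after it
      obtain ⟨hkr, hpre, hmin⟩ := PySem.Chars.findFrom_natCast_spec t.toList c.toList k hk hr
      set r := PySem.Chars.findFrom t.toList c.toList (k : Int) with hrdef
      have h0r : 0 ≤ r := le_trans (by exact_mod_cast Nat.zero_le k) hkr
      have hrm : r = ((r.toNat : Nat) : Int) := (Int.toNat_of_nonneg h0r).symm
      set m := r.toNat with hmdef
      have hkm : k ≤ m := by omega
      have hmn : m < t.toList.length := by
        have hlen := hpre.length_le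
        have hcpos : 0 < c.toList.length := List.length_pos_of_ne_nil hc
        rw [List.length_drop] at hlen
        omega
      have hmatch : PySem.Str.slice t (some (m : Int)) (some ((m : Int) + PySem.Str.len c)) = c :=
        (pvMatch_iff c t m).mpr hpre
      -- unfold one loop iteration
      rw [hff, pvAltLoop, if_neg hr]
      have hcast : r + 1 = (((m + 1 : Nat)) : Int) := by omega
      rw [hcast, ih (m + 1) (acc ++ [pvSnip c t r]) (by omega) (by omega)]
      -- split the range at m
      have hsplit : PySem.List.pyRange (k : Int) (PySem.Str.len t) 1
          = PySem.List.pyRange (k : Int) (m : Int) 1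
            ++ (m : Int) :: PySem.List.pyRange ((m : Int) + 1) (PySem.Str.len t) 1 := by
        rw [PySem.Str.len_eq,
          PySem.List.pyRange_one_append (k : Int) (m : Int) (t.toList.length : Int)
            (by exact_mod_cast hkm) (by exact_mod_cast le_of_lt hmn),
          PySem.List.pyRange_one_cons (a := (m : Int)) (b := (t.toList.length : Int)) (by exact_mod_cast hmn)]
      rw [hsplit]
      have hfil0 : ((PySem.List.pyRange (k : Int) (m : Int) 1).filter
          (fun i => decide (PySem.Str.slice t (some i) (some (i + PySem.Str.len c)) = c))) = [] := by
        rw [List.filter_eq_nil_iff]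
        intro i hi
        have hmem := PySem.List.mem_pyRange_one.mp hi
        have h0 : 0 ≤ i := le_trans (by exact_mod_cast Nat.zero_le k) hmem.1
        have hieq : i = ((i.toNat : Nat) : Int) := (Int.toNat_of_nonneg h0).symm
        simp only [decide_eq_true_eq]
        intro heq
        rw [hieq] at heq
        exact hmin i.toNat (by omega) (by omega) ((pvMatch_iff c t i.toNat).mp heq)
      rw [List.filter_append, hfil0, List.nil_append, List.filter_cons,
        if_pos (by simpa using hmatch)]
      have hmr : ((m : Nat) : Int) = r := hrm.symm
      simp [hmr, List.append_assoc]

-- ===== VERDICT (by name: the statement is the Claim_ definition above) =====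
theorem palavra_chave_spec : Claim_equal_palavra_chave := by
  intro c t _ hpre
  unfold Spec_palavra_chave
  have hc : c.toList ≠ [] := by
    intro h
    exact hpre (by rw [← String.toList_inj] at *; simpa using h)
  have hA : palavra_chave c t
      = ((PySem.List.pyRange ((0 : Nat) : Int) (PySem.Str.len t) 1).filter
          (fun i => decide (PySem.Str.slice t (some i) (some (i + PySem.Str.len c)) = c))).map
            (pvSnip c t) := by
    unfold palavra_chave
    rw [pvFoldl_append_if (fun i => PySem.Str.slice t (some i) (some (i + PySem.Str.len c)) = c)
      (pvSnip c t)]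
    simp
  have hfind : PySem.Str.find t c = PySem.Str.findFrom t c ((0 : Nat) : Int) := by
    simp
  rw [hA]
  unfold palavra_chave_alt
  rw [hfind, pvLoop_eq c t hc (t.toList.length + 2) 0 [] (by omega) (by omega)]
  simp
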